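-- pv_equiv track=rewrite | github.com/EnTangledUpInBlue/qShop | codes/standard_surface_code_coordinates.py | surf_qubit_coords
-- ===== SOURCE A (Python) =====
-- from typing import List, Set, Dict, Tuple
--
-- def surf_qubit_coords(L1: int, L2: int) -> Set[Tuple[int, int]]:
--     r"""
--     Coordinates for the qubits in the standard surface code.
--
--     :param L1:
--     :param L2:
--
--     :return:
--     """
--
--     if L1 == 1:
--         return set([(0, 2 * ii) for ii in range(L2)])
--
--     else:
--         Lset = surf_qubit_coords(L1 - 1, L2)
--         xcoord = 2 * L1 - 2
--         for jj in range(L2 - 1):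
--             ycoord = 2 * jj
--             Lset.add((xcoord, ycoord))
--             Lset.add((xcoord - 1, ycoord + 1))
--         Lset.add((xcoord, 2 * (L2 - 1)))
--
--         return Lset
-- ===== SOURCE B (Python) =====
-- def surf_qubit_coords(L1, L2):
--     # Iterative bottom-up construction: no recursion, one set-update per row.
--     pts = {(0, 2 * ii) for ii in range(L2)}
--     for L in range(2, L1 + 1):
--         x = 2 * L - 2
--         row = [p for jj in range(L2 - 1) for p in ((x, 2 * jj), (x - 1, 2 * jj + 1))]
--         row = row + [(x, 2 * (L2 - 1))]
--         pts.update(row)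
--     return pts
-- ===== Notes on version B (the rewrite author's own statement) =====
-- stated objective: simpler
-- what changed: Replaced the top-down recursion with an iterative bottom-up loop over rows, building each row as one flat list and applying a single set-update per row; no recursion (and no RecursionError depth limit for large L1).
import Mathlib
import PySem

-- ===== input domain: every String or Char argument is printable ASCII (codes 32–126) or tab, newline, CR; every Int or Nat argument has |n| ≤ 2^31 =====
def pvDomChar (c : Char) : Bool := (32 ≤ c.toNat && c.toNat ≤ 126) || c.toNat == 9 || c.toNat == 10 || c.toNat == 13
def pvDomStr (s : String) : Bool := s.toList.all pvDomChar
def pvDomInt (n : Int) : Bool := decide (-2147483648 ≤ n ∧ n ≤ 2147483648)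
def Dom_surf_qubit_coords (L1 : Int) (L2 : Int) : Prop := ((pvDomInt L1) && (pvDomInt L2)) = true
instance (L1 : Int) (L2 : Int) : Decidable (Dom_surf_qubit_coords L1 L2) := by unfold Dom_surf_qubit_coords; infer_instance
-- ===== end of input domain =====

-- B replaces A's recursion by an iterative bottom-up loop with one set-update per row (objective: simpler; same cost).

-- ===== PORT A =====
-- Literal port of A's recursion. The `L1 < 1` guard only makes the Lean function total:
-- there Python A diverges (RecursionError), which Pre_ excludes.
def surf_qubit_coords (L1 : Int) (L2 : Int) : List (Int × Int) :=
  if L1 = 1 then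
    PySem.Set.ofList ((PySem.List.pyRange 0 L2 1).map (fun ii => ((0 : Int), 2 * ii)))
  else if L1 < 1 then []
  else
    let Lset := surf_qubit_coords (L1 - 1) L2
    let xcoord := 2 * L1 - 2
    let Lset := (PySem.List.pyRange 0 (L2 - 1) 1).foldl
      (fun s jj =>
        let ycoord := 2 * jj
        PySem.Set.add (PySem.Set.add s (xcoord, ycoord)) (xcoord - 1, ycoord + 1)) Lset
    PySem.Set.add Lset (xcoord, 2 * (L2 - 1))
termination_by L1.toNat
decreasing_by omega

-- ===== PORT B =====
def surf_row_alt (x L2 : Int) : List (Int × Int) :=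
  ((PySem.List.pyRange 0 (L2 - 1) 1).flatMap
    (fun jj => [(x, 2 * jj), (x - 1, 2 * jj + 1)])) ++ [(x, 2 * (L2 - 1))]

def surf_qubit_coords_alt (L1 : Int) (L2 : Int) : List (Int × Int) :=
  (PySem.List.pyRange 2 (L1 + 1) 1).foldl
    (fun pts L => PySem.Set.update pts (surf_row_alt (2 * L - 2) L2))
    (PySem.Set.ofList ((PySem.List.pyRange 0 L2 1).map (fun ii => ((0 : Int), 2 * ii))))

-- ===== PRECONDITION & SPEC =====
-- Pre_ excludes L1 < 1, where Python A recurses forever (RecursionError): no value is returned there.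
def Pre_surf_qubit_coords (L1 : Int) (L2 : Int) : Prop := 1 ≤ L1
instance (L1 : Int) (L2 : Int) : Decidable (Pre_surf_qubit_coords L1 L2) := by unfold Pre_surf_qubit_coords; infer_instance
def pvWitness_surf_qubit_coords : Int × Int := (3, 2)

def Spec_surf_qubit_coords (L1 : Int) (L2 : Int) (out : List (Int × Int)) : Prop := out = surf_qubit_coords_alt L1 L2
instance (L1 : Int) (L2 : Int) (out : List (Int × Int)) : Decidable (Spec_surf_qubit_coords L1 L2 out) := by unfold Spec_surf_qubit_coords; infer_instance

-- ===== CLAIM (what is proved, stated in full; the proofs are below) =====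
def Claim_equal_surf_qubit_coords : Prop := ∀ (L1 : Int) (L2 : Int), Dom_surf_qubit_coords L1 L2 → Pre_surf_qubit_coords L1 L2 → Spec_surf_qubit_coords L1 L2 (surf_qubit_coords L1 L2)

-- ===== LEMMAS AND PROOFS =====

-- one row of B, folded into a set with `update`, inserts the same points in the same order as A's per-row loop
lemma update_row (s : PySem.Set (Int × Int)) (x L2 : Int) :
    PySem.Set.update s (surf_row_alt x L2) =
      PySem.Set.add
        ((PySem.List.pyRange 0 (L2 - 1) 1).foldl
          (fun s jj => PySem.Set.add (PySem.Set.add s (x, 2 * jj)) (x - 1, 2 * jj + 1)) s)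
        (x, 2 * (L2 - 1)) := by
  unfold surf_row_alt PySem.Set.update
  rw [List.foldl_append]
  simp only [List.foldl_cons, List.foldl_nil]
  congr 1
  induction (PySem.List.pyRange 0 (L2 - 1) 1) generalizing s with
  | nil => rfl
  | cons a t ih => simp [List.flatMap_cons, ih]

lemma key_lemma : ∀ (n : Nat) (L2 : Int),
    surf_qubit_coords (1 + n) L2 = surf_qubit_coords_alt (1 + n) L2 := by
  intro n
  induction n with
  | zero =>
    intro L2
    rw [surf_qubit_coords]
    simp [surf_qubit_coords_alt, PySem.List.pyRange_one_eq_nil]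
  | succ m ih =>
    intro L2
    have h1 : (1 + (↑(m + 1)) : Int) ≠ 1 := by push_cast; omega
    have h2 : ¬ ((1 + (↑(m + 1)) : Int) < 1) := by push_cast; omega
    rw [surf_qubit_coords]
    simp only [h1, h2, if_false]
    have hrec : (1 + (↑(m + 1)) : Int) - 1 = 1 + (m : Int) := by push_cast; omega
    rw [hrec, ih]
    -- unroll the last row of B's fold
    have hsplit : PySem.List.pyRange 2 ((1 + (↑(m + 1)) : Int) + 1) 1
        = PySem.List.pyRange 2 (1 + (↑(m + 1) : Int)) 1 ++ [(1 + (↑(m + 1) : Int))] := by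
      have := PySem.List.pyRange_one_succ_right (a := 2) (b := (1 + (↑(m + 1) : Int)))
        (by push_cast; omega)
      simpa using this
    conv_rhs => rw [surf_qubit_coords_alt, hsplit]
    rw [List.foldl_append]
    simp only [List.foldl_cons, List.foldl_nil]
    rw [update_row, surf_qubit_coords_alt]
    have he : (1 + (m : Int)) + 1 = 1 + (↑(m + 1) : Int) := by push_cast; ring
    rw [he]

-- ===== VERDICT (by name: the statement is the Claim_ definition above) =====
theorem surf_qubit_coords_spec : Claim_equal_surf_qubit_coords := by
  intro L1 L2 _ hpre
  have h : L1 = 1 + ((L1 - 1).toNat : Int) := by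
    unfold Pre_surf_qubit_coords at hpre; omega
  unfold Spec_surf_qubit_coords
  rw [h]
  exact key_lemma (L1 - 1).toNat L2
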